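-- pv_equiv track=rewrite | github.com/WrongWizzli/Education_year_3 | Computer vision/detection/detection_and_metrics.py | fix_box
-- ===== SOURCE A (Python) =====
-- def fix_box(first_bbox):
--     missed_sq = 0
--     if first_bbox[0] + first_bbox[2] <= 0 or first_bbox[1] + first_bbox[3] <= 0:
--         for i in range(len(first_bbox)):
--             first_bbox[i] = 0
--     elif first_bbox[0] < 0 and first_bbox[1] < 0:
--         missed_sq = -(first_bbox[2] * first_bbox[1] +
--                       first_bbox[3] * first_bbox[0] +
--                       first_bbox[0] * first_bbox[1])
--         first_bbox[2] += first_bbox[0]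
--         first_bbox[3] += first_bbox[1]
--         first_bbox[0] = 0
--         first_bbox[1] = 0
--     elif first_bbox[0] < 0:
--         missed_sq = -first_bbox[0] * first_bbox[3]
--         first_bbox[2] += first_bbox[0]
--         first_bbox[0] = 0
--     elif first_bbox[1] < 0:
--         missed_sq = -first_bbox[1] * first_bbox[2]
--         first_bbox[3] += first_bbox[1]
--         first_bbox[1] = 0
--     return first_bbox, missed_sq
-- ===== SOURCE B (Python) =====
-- def fix_box(first_bbox):
--     # fully outside: zero everything (same guard as A, lost area stays 0 there)
--     if first_bbox[0] + first_bbox[2] <= 0 or first_bbox[1] + first_bbox[3] <= 0: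
--         for i in range(len(first_bbox)):
--             first_bbox[i] = 0
--         return first_bbox, 0
--     old_area = first_bbox[2] * first_bbox[3]
--     # clip each axis independently; lost area = area difference
--     for i in range(2):
--         if first_bbox[i] < 0:
--             first_bbox[i + 2] += first_bbox[i]
--             first_bbox[i] = 0
--     return first_bbox, old_area - first_bbox[2] * first_bbox[3]
-- ===== Notes on version B (the rewrite author's own statement) =====
-- stated objective: alternative
-- what changed: Replaces A's three-way elif case analysis and per-case strip formulas by a loop clipping each axis independently, with the lost area obtained as (area before clipping) - (area after clipping).
import Mathlib
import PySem

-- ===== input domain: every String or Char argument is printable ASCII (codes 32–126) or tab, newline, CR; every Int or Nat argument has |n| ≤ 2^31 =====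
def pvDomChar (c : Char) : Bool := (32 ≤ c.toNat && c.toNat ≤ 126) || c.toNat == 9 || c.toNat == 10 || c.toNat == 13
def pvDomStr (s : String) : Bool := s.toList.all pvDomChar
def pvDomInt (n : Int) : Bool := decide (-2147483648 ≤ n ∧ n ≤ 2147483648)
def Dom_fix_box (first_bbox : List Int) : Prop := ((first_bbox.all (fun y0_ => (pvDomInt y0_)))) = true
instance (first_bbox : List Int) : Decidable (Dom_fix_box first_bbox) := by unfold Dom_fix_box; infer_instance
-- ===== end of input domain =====

-- B clips each axis in a loop and computes the lost area as area-before minus area-after,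
-- instead of A's elif chain with per-case strip formulas; equivalence is about the RETURN
-- value (both Pythons also mutate the argument list in the same way).

-- ===== PORT A =====
-- A's elif chain, step for step; the zeroing loop becomes a map to 0 over the whole list.
def fix_box (first_bbox : List Int) : List Int × Int :=
  match first_bbox with
  | a :: b :: c :: d :: rest =>
    if a + c ≤ 0 ∨ b + d ≤ 0 then
      (first_bbox.map (fun _ => (0 : Int)), 0)
    else if a < 0 ∧ b < 0 then
      ((0 : Int) :: 0 :: (c + a) :: (d + b) :: rest, -(c * b + d * a + a * b))
    else if a < 0 then
      ((0 : Int) :: b :: (c + a) :: d :: rest, -a * d)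
    else if b < 0 then
      (a :: 0 :: c :: (d + b) :: rest, -b * c)
    else (first_bbox, 0)
  | _ => (first_bbox, 0)   -- outside Pre_ (Python raises IndexError)

-- ===== PORT B =====
-- one iteration of B's clip loop: clip axis i (index i negative → add it to size i+2, zero it)
def clipAxis (box : List Int) (i : Nat) : List Int :=
  let c := box.getD i 0
  if c < 0 then (box.set (i + 2) (box.getD (i + 2) 0 + c)).set i 0 else box

def fix_box_alt (first_bbox : List Int) : List Int × Int :=
  if first_bbox.length < 4 then (first_bbox, 0)   -- outside Pre_ (Python raises IndexError)
  else if first_bbox.getD 0 0 + first_bbox.getD 2 0 ≤ 0 ∨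
          first_bbox.getD 1 0 + first_bbox.getD 3 0 ≤ 0 then
    (first_bbox.map (fun _ => (0 : Int)), 0)
  else
    let old_area := first_bbox.getD 2 0 * first_bbox.getD 3 0
    let b := List.foldl clipAxis first_bbox [0, 1]
    (b, old_area - b.getD 2 0 * b.getD 3 0)

-- ===== PRECONDITION & SPEC =====
-- Python A indexes first_bbox[0..3], so it raises IndexError on lists shorter than 4.
def Pre_fix_box (first_bbox : List Int) : Prop := 4 ≤ first_bbox.length
instance (first_bbox : List Int) : Decidable (Pre_fix_box first_bbox) := by unfold Pre_fix_box; infer_instance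
def pvWitness_fix_box : List Int := [-2, -3, 5, 7]

def Spec_fix_box (first_bbox : List Int) (out : List Int × Int) : Prop := out = fix_box_alt first_bbox
instance (first_bbox : List Int) (out : List Int × Int) : Decidable (Spec_fix_box first_bbox out) := by unfold Spec_fix_box; infer_instance

-- ===== CLAIM =====
def Claim_equal_fix_box : Prop := ∀ (first_bbox : List Int), Dom_fix_box first_bbox → Pre_fix_box first_bbox → Spec_fix_box first_bbox (fix_box first_bbox)

-- ===== LEMMAS AND PROOFS =====

-- ===== VERDICT =====
theorem fix_box_spec : Claim_equal_fix_box := by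
  intro l _ hpre
  unfold Spec_fix_box fix_box fix_box_alt
  match l with
  | [] => exact absurd hpre (by simp [Pre_fix_box])
  | [_] => exact absurd hpre (by simp [Pre_fix_box])
  | [_, _] => exact absurd hpre (by simp [Pre_fix_box])
  | [_, _, _] => exact absurd hpre (by simp [Pre_fix_box])
  | a :: b :: c :: d :: rest =>
    rw [if_neg (show ¬ ((a :: b :: c :: d :: rest).length < 4) by simp)]
    by_cases hg : a + c ≤ 0 ∨ b + d ≤ 0
    · simp only [List.getD, List.getElem?_cons_zero, List.getElem?_cons_succ,
        Option.getD_some, if_pos hg]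
    · simp only [List.getD, List.getElem?_cons_zero, List.getElem?_cons_succ,
        Option.getD_some, if_neg hg, List.foldl, clipAxis, List.set]
      rcases lt_or_ge a 0 with ha | ha <;> rcases lt_or_ge b 0 with hb | hb
      · simp [ha, hb, List.set]; ring
      · simp [ha, hb.not_gt]; ring
      · simp [ha.not_gt, hb, List.set]; ring
      · simp [ha.not_gt, hb.not_gt]
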